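-- pv_equiv track=rewrite | github.com/gkamer8/baseball-team-value | get_full_team_data.py | change_contract_names
-- ===== SOURCE A (Python) =====
-- def change_contract_names(notes):
--     new_lst = []
--     for item in notes:
--         if "Team Option" in item:
--             new_lst.append('team option')
--         elif "Mutual Option" in item:
--             new_lst.append('mutual option')
--         elif "Player Option" in item:
--             new_lst.append('player option')
--         elif "Vesting Option" in item:
--             new_lst.append('vesting option')
--         else:
--             new_lst.append('salary')
--     return new_lst
-- ===== SOURCE B (Python) =====
-- def change_contract_names(notes):
--     # Stage 0: everything is a plain salary.
--     labels = ['salary'] * len(notes)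
--     # Staged overwrite passes, lowest priority first: the last pass that
--     # matches an item wins, so Team Option ends up taking precedence.
--     for sub, lab in (("Vesting Option", "vesting option"),
--                      ("Player Option", "player option"),
--                      ("Mutual Option", "mutual option"),
--                      ("Team Option", "team option")):
--         for i, item in enumerate(notes):
--             if sub in item:
--                 labels[i] = lab
--     return labels
-- ===== Notes on version B (the rewrite author's own statement) =====
-- stated objective: alternative
-- what changed: Replaces A's single pass with a per-item if-elif ladder by a preallocated 'salary' label list refined by four staged whole-list overwrite passes in reverse priority order, so priority comes from overwrite order instead of branch order.
import Mathlib
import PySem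

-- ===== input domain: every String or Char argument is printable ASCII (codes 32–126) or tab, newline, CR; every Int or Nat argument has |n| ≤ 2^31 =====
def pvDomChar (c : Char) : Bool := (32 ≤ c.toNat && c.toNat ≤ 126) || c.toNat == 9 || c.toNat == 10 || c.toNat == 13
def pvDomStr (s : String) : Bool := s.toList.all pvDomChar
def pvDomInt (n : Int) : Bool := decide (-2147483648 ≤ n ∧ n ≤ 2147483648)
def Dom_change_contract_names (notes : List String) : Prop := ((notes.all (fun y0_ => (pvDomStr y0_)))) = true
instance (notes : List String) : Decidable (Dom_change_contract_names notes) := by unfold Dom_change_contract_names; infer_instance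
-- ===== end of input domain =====

-- B replaces A's one-pass if-elif ladder by staged whole-list overwrite passes in reverse priority order (alternative decomposition, same cost).
-- ===== PORT A =====
def change_contract_names (notes : List String) : List String :=
  notes.foldl (fun new_lst item =>
    if PySem.Str.isIn "Team Option" item then new_lst ++ ["team option"]
    else if PySem.Str.isIn "Mutual Option" item then new_lst ++ ["mutual option"]
    else if PySem.Str.isIn "Player Option" item then new_lst ++ ["player option"]
    else if PySem.Str.isIn "Vesting Option" item then new_lst ++ ["vesting option"]
    else new_lst ++ ["salary"]) []

-- ===== PORT B =====
-- patterns in reverse priority order: the last pass that matches wins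
def pvPatterns : List (String × String) :=
  [("Vesting Option", "vesting option"), ("Player Option", "player option"),
   ("Mutual Option", "mutual option"), ("Team Option", "team option")]

-- one overwrite pass: Source B's `for i, item in enumerate(notes): if sub in item: labels[i] = lab`
-- (the in-place index assignment is ported exactly as the pointwise update over labels zipped with notes)
def pvPass (p : String × String) (labels : List String) (notes : List String) : List String :=
  (labels.zip notes).map (fun li => if PySem.Str.isIn p.1 li.2 then p.2 else li.1)

def change_contract_names_alt (notes : List String) : List String :=
  pvPatterns.foldl (fun labels p => pvPass p labels notes) (notes.map (fun _ => "salary"))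

-- ===== PRECONDITION & SPEC =====
def Spec_change_contract_names (notes : List String) (out : List String) : Prop := out = change_contract_names_alt notes
instance (notes : List String) (out : List String) : Decidable (Spec_change_contract_names notes out) := by unfold Spec_change_contract_names; infer_instance

-- ===== CLAIM (what is proved, stated in full; the proofs are below) =====
def Claim_equal_change_contract_names : Prop := ∀ (notes : List String), Dom_change_contract_names notes → Spec_change_contract_names notes (change_contract_names notes)

-- ===== LEMMAS AND PROOFS =====
-- the per-item label B's staged passes compute (team outermost = last overwrite)
def pvLadder (item : String) : String :=
  if PySem.Str.isIn "Team Option" item then "team option"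
  else if PySem.Str.isIn "Mutual Option" item then "mutual option"
  else if PySem.Str.isIn "Player Option" item then "player option"
  else if PySem.Str.isIn "Vesting Option" item then "vesting option"
  else "salary"

theorem alt_eq_map (notes : List String) :
    change_contract_names_alt notes = notes.map pvLadder := by
  induction notes with
  | nil => rfl
  | cons item rest ih =>
      simp only [change_contract_names_alt, pvPatterns, List.foldl, pvPass,
        List.map_cons, List.zip_cons_cons, pvLadder] at *
      rw [ih]

theorem foldl_ladder_append (notes : List String) (acc : List String) :
    notes.foldl (fun new_lst item =>
      if PySem.Str.isIn "Team Option" item then new_lst ++ ["team option"]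
      else if PySem.Str.isIn "Mutual Option" item then new_lst ++ ["mutual option"]
      else if PySem.Str.isIn "Player Option" item then new_lst ++ ["player option"]
      else if PySem.Str.isIn "Vesting Option" item then new_lst ++ ["vesting option"]
      else new_lst ++ ["salary"]) acc = acc ++ notes.map pvLadder := by
  induction notes generalizing acc with
  | nil => simp
  | cons item rest ih =>
      simp only [List.foldl, List.map, ih, pvLadder]
      split_ifs <;> simp

-- ===== VERDICT (by name: the statement is the Claim_ definition above) =====
theorem change_contract_names_spec : Claim_equal_change_contract_names := by
  intro notes _
  unfold Spec_change_contract_names change_contract_names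
  rw [alt_eq_map]
  simpa using foldl_ladder_append notes []
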